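-- pv_equiv track=rewrite | github.com/AlexKaiLe/Genome-Assembly | contamination.py | remove_contam
-- ===== SOURCE A (Python) =====
-- def remove_contam(reads, k_mers, vector, k):
--     clean = []
--     indices = []
--     # Run through all the reads
--     for i in range(len(reads)):
--         read = reads[i]
--         far_left = []
--         far_right = []
--         # run through all the k_mers of the vector
--         for j in range(len(k_mers)):
--             index = k_mers[j][0]
--             k_mer = k_mers[j][1]
--             # obtain the left and right most indicies to remove
--             far_left.append(front(read, k_mer, index, vector, k))
--             far_right.append(back(read, k_mer, index, vector, k))
--
--         #take the right most left index
--         max_left = max(far_left)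
--         #take the left most right index
--         min_right = min(far_right)
--         # check if the bounds extend the range of the read
--         if max_left > 0 or min_right < len(read):
--             indices.append(i)
--
--         # append all cleaned reads to a list
--         clean.append(read[max_left:min_right])
--     return indices, clean
--
-- def front(read, k_mer, index, vector, k):
--     left = 0
--     # forward
--     if check_match(read[0:k], k_mer):
--         # run through the read and extend from the left to the right
--         for i in range(len(read)):
--             vector_index = index + i
--             read_index = i
--
--             # check if the value of the read and vector are the same
--             if vector_index >= len(vector):
--                 break
--             if read[read_index] == vector[vector_index]:
--                 left = read_index + 1
--             else:
--                 break
--     return left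
--
-- def back(read, k_mer, index, vector, k):
--     right = len(read)
--     # backward
--     if check_match(read[-k:-1], k_mer):
--         # run through the read and extend from the right to the left
--         for i in range(len(read)):
--             vector_index = index - i
--             read_index = len(read)-k-i
--
--             # check if the value of the read and vector are the same
--             if vector_index < 0:
--                 break
--             if read[read_index] == vector[vector_index]:
--                 right = read_index
--             else:
--                 break
--     return right
--
-- def check_match(read, k_mer):
--     if len(read) != len(read):
--         return False
--     for i in range(len(read)):
--         if k_mer[i] != read[i]:
--             return False
--     return True
-- ===== SOURCE B (Python) =====
-- def remove_contam(reads, k_mers, vector, k):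
--     # Index every prefix of every k-mer once: A's per-(read, k-mer) character scan
--     # accepts exactly when the read slice is a prefix of the k-mer, so one dict
--     # lookup per read end replaces the scan over all k-mers.
--     prefix_idx = {}
--     for index, k_mer in k_mers:
--         for L in range(len(k_mer) + 1):
--             prefix_idx.setdefault(k_mer[:L], []).append(index)
--     indices = []
--     clean = []
--     for i, read in enumerate(reads):
--         max_left = max((_extend_front(read, idx, vector)
--                         for idx in prefix_idx.get(read[:k], [])), default=0)
--         min_right = min((_extend_back(read, idx, vector, k)
--                          for idx in prefix_idx.get(read[-k:-1], [])), default=len(read))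
--         if max_left > 0 or min_right < len(read):
--             indices.append(i)
--         clean.append(read[max_left:min_right])
--     return indices, clean
--
--
-- def _extend_front(read, index, vector):
--     left = 0
--     for i in range(len(read)):
--         vi = index + i
--         if vi >= len(vector):
--             break
--         if read[i] == vector[vi]:
--             left = i + 1
--         else:
--             break
--     return left
--
--
-- def _extend_back(read, index, vector, k):
--     right = len(read)
--     for i in range(len(read)):
--         vi = index - i
--         if vi < 0:
--             break
--         if read[len(read) - k - i] == vector[vi]:
--             right = len(read) - k - i
--         else:
--             break
--     return right
-- ===== Notes on version B (the rewrite author's own statement) =====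
-- stated objective: faster
-- what changed: A scans every k-mer for every read, re-running a per-character prefix check each time; B builds one hash index over all prefixes of all k-mers once and per read looks up only the k-mers matching read[:k] / read[-k:-1], running the extension loop only for those; B returns A's exact value everywhere A returns, and Pre_ only excludes inputs where A raises (empty k-mer list, a k-mer check or an extension loop indexing out of range), conservatively so for back matches with k > len(read)+1 where the loop may stop before the bad index (see cites).
-- outside the precondition, e.g. on remove_contam(['AB'], [(0, 'AB')], 'ZZZZ', 4): A returns ([], ['AB']), B returns ([], ['AB'])
import Mathlib
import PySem

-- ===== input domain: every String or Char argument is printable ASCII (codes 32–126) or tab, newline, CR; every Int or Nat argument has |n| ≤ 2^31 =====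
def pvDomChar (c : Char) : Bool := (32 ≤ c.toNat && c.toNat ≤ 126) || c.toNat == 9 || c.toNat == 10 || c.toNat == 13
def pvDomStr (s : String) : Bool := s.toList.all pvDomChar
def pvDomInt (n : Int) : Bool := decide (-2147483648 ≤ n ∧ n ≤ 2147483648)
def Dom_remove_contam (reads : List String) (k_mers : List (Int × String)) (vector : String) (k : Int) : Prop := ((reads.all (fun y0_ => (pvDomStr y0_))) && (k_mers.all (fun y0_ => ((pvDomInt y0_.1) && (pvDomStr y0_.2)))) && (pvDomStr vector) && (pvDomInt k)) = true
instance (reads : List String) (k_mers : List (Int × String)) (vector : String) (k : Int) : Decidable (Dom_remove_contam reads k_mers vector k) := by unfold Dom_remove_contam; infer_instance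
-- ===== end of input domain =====

-- B replaces A's scan of every k-mer per read (each with a per-character prefix check)
-- by one hash index over all prefixes of all k-mers, built once; per read it looks up
-- only the k-mers matching read[:k] / read[-k:-1]. B returns A's exact value wherever
-- A returns; Pre_ excludes only inputs on which A raises (conservatively for one
-- corner, see the comment at Pre_).

-- ===== PORT A =====

-- check_match(read, k_mer): the (vacuous) length guard, then the per-index scan with early False
def checkGoA (rd km : List Char) : List Nat → Bool
  | [] => true
  | i :: rest =>
    if PySem.List.pyGetD km (i : Int) ' ' ≠ PySem.List.pyGetD rd (i : Int) ' ' then false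
    else checkGoA rd km rest

def check_match (rd km : List Char) : Bool :=
  if rd.length ≠ rd.length then false else checkGoA rd km (List.range rd.length)

-- the for-loop of front(): i over range(len(read)), state `left`, break via early return
def frontGoA (rd vec : List Char) (index : Int) : List Nat → Int → Int
  | [], left => left
  | i :: rest, left =>
    let vi := index + (i : Int)
    if (vec.length : Int) ≤ vi then left
    else if PySem.List.pyGetD rd (i : Int) ' ' = PySem.List.pyGetD vec vi ' ' then
      frontGoA rd vec index rest ((i : Int) + 1)
    else left

def front (rd km : List Char) (index : Int) (vec : List Char) (k : Int) : Int :=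
  if check_match (PySem.List.slice rd (some 0) (some k)) km then
    frontGoA rd vec index (List.range rd.length) 0
  else 0

-- the for-loop of back(): state `right`, break via early return
def backGoA (rd vec : List Char) (index k : Int) : List Nat → Int → Int
  | [], right => right
  | i :: rest, right =>
    let vi := index - (i : Int)
    let ri : Int := (rd.length : Int) - k - (i : Int)
    if vi < 0 then right
    else if PySem.List.pyGetD rd ri ' ' = PySem.List.pyGetD vec vi ' ' then
      backGoA rd vec index k rest ri
    else right

def back (rd km : List Char) (index : Int) (vec : List Char) (k : Int) : Int :=
  if check_match (PySem.List.slice rd (some (-k)) (some (-1))) km then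
    backGoA rd vec index k (List.range rd.length) (rd.length : Int)
  else (rd.length : Int)

def remove_contam (reads : List String) (k_mers : List (Int × String)) (vector : String) (k : Int) : List Int × List String :=
  let vec := vector.toList
  (PySem.List.enumerate reads).foldl (fun st pr =>
    let rd := pr.2.toList
    let far_left := k_mers.foldl (fun acc p => acc ++ [front rd p.2.toList p.1 vec k]) []
    let far_right := k_mers.foldl (fun acc p => acc ++ [back rd p.2.toList p.1 vec k]) []
    let max_left := (PySem.List.max? far_left (fun x => x)).getD 0
    let min_right := (PySem.List.min? far_right (fun x => x)).getD 0
    ((if 0 < max_left ∨ min_right < (rd.length : Int) then st.1 ++ [pr.1] else st.1),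
     st.2 ++ [String.ofList (PySem.List.slice rd (some max_left) (some min_right))]))
  ([], [])

-- ===== PORT B =====

-- _extend_front's loop
def extendFrontGo (rd : List Char) (index : Int) (vec : List Char) : List Nat → Int → Int
  | [], left => left
  | i :: rest, left =>
    let vi := index + (i : Int)
    if (vec.length : Int) ≤ vi then left
    else if PySem.List.pyGetD rd (i : Int) ' ' = PySem.List.pyGetD vec vi ' ' then
      extendFrontGo rd index vec rest ((i : Int) + 1)
    else left

def extend_front (rd : List Char) (index : Int) (vec : List Char) : Int :=
  extendFrontGo rd index vec (List.range rd.length) 0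

-- _extend_back's loop
def extendBackGo (rd : List Char) (index : Int) (vec : List Char) (k : Int) : List Nat → Int → Int
  | [], right => right
  | i :: rest, right =>
    let vi := index - (i : Int)
    if vi < 0 then right
    else if PySem.List.pyGetD rd ((rd.length : Int) - k - (i : Int)) ' ' = PySem.List.pyGetD vec vi ' ' then
      extendBackGo rd index vec k rest ((rd.length : Int) - k - (i : Int))
    else right

def extend_back (rd : List Char) (index : Int) (vec : List Char) (k : Int) : Int :=
  extendBackGo rd index vec k (List.range rd.length) (rd.length : Int)

def remove_contam_alt (reads : List String) (k_mers : List (Int × String)) (vector : String) (k : Int) : List Int × List String :=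
  let vec := vector.toList
  -- prefix_idx: for each k-mer, every prefix k_mer[:L] maps to the indices (setdefault/append)
  let pidx := k_mers.foldl
    (fun (d : PySem.Dict (List Char) (List Int)) p =>
      (List.range (p.2.toList.length + 1)).foldl
        (fun d (L : Nat) => d.modify (PySem.List.slice p.2.toList none (some (L : Int))) [] (fun v => v ++ [p.1])) d)
    PySem.Dict.empty
  (PySem.List.enumerate reads).foldl (fun st pr =>
    let rd := pr.2.toList
    let max_left := PySem.List.maxD
      ((pidx.getD (PySem.List.slice rd none (some k)) []).map (fun idx => extend_front rd idx vec))
      (fun x => x) 0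
    let min_right := PySem.List.minD
      ((pidx.getD (PySem.List.slice rd (some (-k)) (some (-1))) []).map (fun idx => extend_back rd idx vec k))
      (fun x => x) (rd.length : Int)
    ((if 0 < max_left ∨ min_right < (rd.length : Int) then st.1 ++ [pr.1] else st.1),
     st.2 ++ [String.ofList (PySem.List.slice rd (some max_left) (some min_right))]))
  ([], [])

-- ===== PRECONDITION & SPEC =====
-- Per (k-mer, read) pair: A's character check raises when the k-mer is a proper prefix of the
-- read slice (so a prefix-hit must be the whole k-mer); and a matched extension loop must not
-- index outside read/vector (front: offset ≥ -len(vector); back, for offset ≥ 0: offset inside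
-- the vector and 1 ≤ k ≤ len(read)+1 — conservative for k ∈ (len+1, 2len], where A raises
-- unless an early character mismatch stops the loop first; there B returns A's value, see cites).
def preOK (V : Nat) (k : Int) (p : Int × String) (r : String) : Prop :=
  (p.2.toList <+: PySem.List.slice r.toList none (some k) →
     p.2.toList = PySem.List.slice r.toList none (some k)) ∧
  (p.2.toList <+: PySem.List.slice r.toList (some (-k)) (some (-1)) →
     p.2.toList = PySem.List.slice r.toList (some (-k)) (some (-1))) ∧
  (PySem.List.slice r.toList none (some k) <+: p.2.toList → 0 < r.toList.length →
     -(V : Int) ≤ p.1) ∧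
  (PySem.List.slice r.toList (some (-k)) (some (-1)) <+: p.2.toList → 0 < r.toList.length →
     0 ≤ p.1 → p.1 < (V : Int) ∧ 1 ≤ k ∧ k ≤ (r.toList.length : Int) + 1)

-- Pre_ excludes exactly the inputs on which A raises: an empty k-mer list with reads present
-- (max([]) raises), and (k-mer, read) pairs whose character check or extension loop indexes
-- out of range — conservatively for back matches with k > len(read)+1 (A may still return
-- there via an early mismatch; B returns the same value, see claim cites).
def Pre_remove_contam (reads : List String) (k_mers : List (Int × String)) (vector : String) (k : Int) : Prop :=
  (reads = [] ∨ k_mers ≠ []) ∧ ∀ p ∈ k_mers, ∀ r ∈ reads, preOK vector.toList.length k p r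
instance (reads : List String) (k_mers : List (Int × String)) (vector : String) (k : Int) : Decidable (Pre_remove_contam reads k_mers vector k) := by
  unfold Pre_remove_contam
  haveI : ∀ (V : Nat) (k : Int) (p : Int × String) (r : String), Decidable (preOK V k p r) :=
    fun V k p r => by unfold preOK; infer_instance
  infer_instance

def pvWitness_remove_contam : List String × (List (Int × String)) × String × Int :=
  (["ACG"], [((0 : Int), "AC")], "ACGT", (2 : Int))

def Spec_remove_contam (reads : List String) (k_mers : List (Int × String)) (vector : String) (k : Int) (out : List Int × List String) : Prop := out = remove_contam_alt reads k_mers vector k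
instance (reads : List String) (k_mers : List (Int × String)) (vector : String) (k : Int) (out : List Int × List String) : Decidable (Spec_remove_contam reads k_mers vector k out) := by unfold Spec_remove_contam; infer_instance

-- ===== CLAIM (what is proved, stated in full; the proofs are below) =====
def Claim_equal_remove_contam : Prop := ∀ (reads : List String) (k_mers : List (Int × String)) (vector : String) (k : Int), Dom_remove_contam reads k_mers vector k → Pre_remove_contam reads k_mers vector k → Spec_remove_contam reads k_mers vector k (remove_contam reads k_mers vector k)

-- ===== LEMMAS AND PROOFS =====

-- B's extension loops are A's inner loops
theorem frontGo_eq (rd vec : List Char) (index : Int) (l : List Nat) (a : Int) :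
    extendFrontGo rd index vec l a = frontGoA rd vec index l a := by
  induction l generalizing a with
  | nil => rfl
  | cons i rest ih => simp only [extendFrontGo, frontGoA]; split_ifs <;> simp [ih]

theorem backGo_eq (rd vec : List Char) (index k : Int) (l : List Nat) (a : Int) :
    extendBackGo rd index vec k l a = backGoA rd vec index k l a := by
  induction l generalizing a with
  | nil => rfl
  | cons i rest ih => simp only [extendBackGo, backGoA]; split_ifs <;> simp [ih]

-- characterising check_match by prefix relations
theorem checkGo_iff (rd km : List Char) (l : List Nat) :
    checkGoA rd km l = true ↔
      ∀ i ∈ l, PySem.List.pyGetD km (i : Int) ' ' = PySem.List.pyGetD rd (i : Int) ' ' := by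
  induction l with
  | nil => simp [checkGoA]
  | cons i rest ih =>
    by_cases h : PySem.List.pyGetD km (i : Int) ' ' = PySem.List.pyGetD rd (i : Int) ' '
    · rw [show checkGoA rd km (i :: rest) = checkGoA rd km rest by simp [checkGoA, h]]
      rw [ih]
      simp only [List.mem_cons]
      constructor
      · rintro hall j (rfl | hj)
        exacts [h, hall j hj]
      · intro hall j hj
        exact hall j (Or.inr hj)
    · have h' : ¬ (km[i]?.getD ' ' = rd[i]?.getD ' ') := by simpa using h
      rw [show checkGoA rd km (i :: rest) = false by simp [checkGoA, h']]
      simp only [List.mem_cons]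
      constructor
      · intro hf
        cases hf
      · intro hall
        exact absurd (hall i (Or.inl rfl)) h

theorem check_of_prefix (s km : List Char) (h : s <+: km) : check_match s km = true := by
  rw [check_match, if_neg (by simp), checkGo_iff]
  intro i hi
  rw [List.mem_range] at hi
  obtain ⟨t, rfl⟩ := h
  rw [PySem.List.pyGetD_natCast, PySem.List.pyGetD_natCast, List.getD_eq_getElem?_getD,
    List.getD_eq_getElem?_getD, List.getElem?_append_left hi]

theorem check_true_imp (s km : List Char) (h : check_match s km = true) :
    s <+: km ∨ km <+: s := by
  rw [check_match, if_neg (by simp), checkGo_iff] at h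
  by_cases hl : s.length ≤ km.length
  · left
    have hs : s = km.take s.length := by
      apply List.ext_getElem (by simp [hl])
      intro i h1 h2
      have hik : i < km.length := by omega
      have := h i (by simpa using h1)
      rw [PySem.List.pyGetD_natCast, PySem.List.pyGetD_natCast,
        List.getD_eq_getElem _ _ hik, List.getD_eq_getElem _ _ h1] at this
      simp [List.getElem_take, ← this]
    rw [hs]
    exact List.take_prefix _ _
  · right
    have hk : km = s.take km.length := by
      apply List.ext_getElem (by simp; omega)
      intro i h1 h2
      have his : i < s.length := by omega
      have := h i (by simpa using his)
      rw [PySem.List.pyGetD_natCast, PySem.List.pyGetD_natCast,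
        List.getD_eq_getElem _ _ h1, List.getD_eq_getElem _ _ his] at this
      simp [List.getElem_take, this]
    rw [hk]
    exact List.take_prefix _ _

-- bounds on the loop results
theorem frontGo_nonneg (rd vec : List Char) (index : Int) (l : List Nat) (a : Int)
    (ha : 0 ≤ a) : 0 ≤ frontGoA rd vec index l a := by
  induction l generalizing a with
  | nil => exact ha
  | cons i rest ih => simp only [frontGoA]; split_ifs <;> first | exact ha | exact ih _ (by positivity)

theorem backGo_le (rd vec : List Char) (index k : Int) (hk : 1 ≤ k) (l : List Nat) (a : Int)
    (ha : a ≤ (rd.length : Int)) : backGoA rd vec index k l a ≤ (rd.length : Int) := by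
  induction l generalizing a with
  | nil => exact ha
  | cons i rest ih =>
    simp only [backGoA]
    split_ifs <;> first | exact ha | exact ih _ (by omega)

-- a negative offset stops A's back scan at once
theorem backGo_stop (rd vec : List Char) (index k : Int) (l : List Nat) (a : Int)
    (h : index < 0) : backGoA rd vec index k l a = a := by
  cases l with
  | nil => rfl
  | cons i rest => simp only [backGoA]; rw [if_pos (by omega)]

-- front/back as a match-on-the-prefix conditional (under the pair condition)
theorem front_eq (r : String) (km : List Char) (index : Int) (vec : List Char) (k : Int)
    (hcl : km <+: PySem.List.slice r.toList none (some k) →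
           km = PySem.List.slice r.toList none (some k)) :
    front r.toList km index vec k =
      if PySem.List.slice r.toList none (some k) <+: km then
        frontGoA r.toList vec index (List.range r.toList.length) 0
      else 0 := by
  unfold front
  rw [PySem.List.slice_zero_start]
  by_cases hc : PySem.List.slice r.toList none (some k) <+: km
  · rw [if_pos (check_of_prefix _ _ hc), if_pos hc]
  · rw [if_neg ?_, if_neg hc]
    intro h
    rcases check_true_imp _ _ h with h1 | h2
    · exact hc h1
    · exact hc ((hcl h2) ▸ List.prefix_refl _)

theorem back_eq (r : String) (km : List Char) (index : Int) (vec : List Char) (k : Int)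
    (hcl : km <+: PySem.List.slice r.toList (some (-k)) (some (-1)) →
           km = PySem.List.slice r.toList (some (-k)) (some (-1))) :
    back r.toList km index vec k =
      if PySem.List.slice r.toList (some (-k)) (some (-1)) <+: km then
        backGoA r.toList vec index k (List.range r.toList.length) (r.toList.length : Int)
      else (r.toList.length : Int) := by
  unfold back
  by_cases hc : PySem.List.slice r.toList (some (-k)) (some (-1)) <+: km
  · rw [if_pos (check_of_prefix _ _ hc), if_pos hc]
  · rw [if_neg ?_, if_neg hc]
    intro h
    rcases check_true_imp _ _ h with h1 | h2
    · exact hc h1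
    · exact hc ((hcl h2) ▸ List.prefix_refl _)

-- the prefixes of one k-mer that equal c: exactly one iff c is a prefix
theorem range_filter_take_eq (km c : List Char) :
    (List.range (km.length + 1)).filter (fun L => km.take L == c)
      = if c <+: km then [c.length] else [] := by
  by_cases hc : c <+: km
  · rw [if_pos hc]
    have hlen : c.length ≤ km.length := hc.length_le
    have hcongr : ∀ L ∈ List.range (km.length + 1),
        (km.take L == c) = (L == c.length) := by
      intro L hL
      rw [List.mem_range] at hL
      by_cases hLc : L = c.length
      · subst hLc
        have : km.take c.length = c := (List.prefix_iff_eq_take.mp hc).symm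
        simp [this]
      · have : km.take L ≠ c := by
          intro he
          apply hLc
          have := congrArg List.length he
          simp at this
          omega
        simp [this, hLc]
    rw [List.filter_congr hcongr, List.filter_beq,
      List.count_eq_one_of_mem (List.nodup_range) (by rw [List.mem_range]; omega)]
    rfl
  · rw [if_neg hc, List.filter_eq_nil_iff]
    intro L _
    simp only [beq_iff_eq]
    intro he
    exact hc (he ▸ List.take_prefix _ _)

-- the prefix index: lookup = indices of the k-mers having c as a prefix, in order
theorem pidx_lookup (k_mers : List (Int × String)) (c : List Char) :
    ((k_mers.foldl
        (fun (d : PySem.Dict (List Char) (List Int)) p =>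
          (List.range (p.2.toList.length + 1)).foldl
            (fun d (L : Nat) => d.modify (PySem.List.slice p.2.toList none (some (L : Int))) [] (fun v => v ++ [p.1])) d)
        PySem.Dict.empty).getD c [])
      = (k_mers.filter (fun p => decide (c <+: p.2.toList))).map (fun p => p.1) := by
  suffices h : ∀ (d : PySem.Dict (List Char) (List Int)),
      ((k_mers.foldl
        (fun d p =>
          (List.range (p.2.toList.length + 1)).foldl
            (fun d (L : Nat) => d.modify (PySem.List.slice p.2.toList none (some (L : Int))) [] (fun v => v ++ [p.1])) d)
        d).getD c [])
      = d.getD c [] ++ (k_mers.filter (fun p => decide (c <+: p.2.toList))).map (fun p => p.1) by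
    rw [h]; rfl
  induction k_mers with
  | nil => intro d; simp
  | cons p t ih =>
    intro d
    rw [List.foldl_cons, ih]
    have hstep : ((List.range (p.2.toList.length + 1)).foldl
        (fun d (L : Nat) => d.modify (PySem.List.slice p.2.toList none (some (L : Int))) [] (fun v => v ++ [p.1])) d).getD c []
        = d.getD c [] ++ (if c <+: p.2.toList then [p.1] else []) := by
      have hmap : ((List.range (p.2.toList.length + 1)).foldl
          (fun d (L : Nat) => d.modify (PySem.List.slice p.2.toList none (some (L : Int))) [] (fun v => v ++ [p.1])) d)
          = (((List.range (p.2.toList.length + 1)).map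
              (fun L => (p.2.toList.take L, p.1))).foldl
              (fun d q => d.modify q.1 [] (fun v => v ++ [q.2])) d) := by
        rw [List.foldl_map]
        refine PySem.List.foldl_congr_mem _ _ _ _ (fun acc L _ => ?_)
        rw [PySem.List.slice_to_natCast]
      rw [hmap, PySem.Dict.getD_foldl_modify_append]
      congr 1
      rw [List.filter_map]
      have : (List.range (p.2.toList.length + 1)).filter
          ((fun q => q.1 == c) ∘ (fun L => (p.2.toList.take L, p.1)))
          = (List.range (p.2.toList.length + 1)).filter (fun L => p.2.toList.take L == c) := rfl
      rw [this, range_filter_take_eq]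
      split_ifs <;> simp
    rw [hstep]
    by_cases hcp : c <+: p.2.toList
    · rw [List.filter_cons_of_pos (by simpa using hcp)]
      simp [hcp]
    · rw [List.filter_cons_of_neg (by simpa using hcp)]
      simp [hcp]

-- max/min over all k-mers reduce to fold forms and then to the matching subset
theorem getD_max?_eq_foldl (xs : List Int) (h0 : ∀ x ∈ xs, 0 ≤ x) (hne : xs ≠ []) :
    (PySem.List.max? xs (fun y => y)).getD 0 = xs.foldl max 0 := by
  cases xs with
  | nil => simp at hne
  | cons x t =>
    rw [PySem.List.max?_id_cons]
    simp only [Option.getD_some, List.foldl_cons]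
    rw [show max 0 x = x from max_eq_right (h0 x (by simp))]

theorem getD_min?_eq_foldl (xs : List Int) (L : Int) (h0 : ∀ x ∈ xs, x ≤ L) (hne : xs ≠ []) :
    (PySem.List.min? xs (fun y => y)).getD 0 = xs.foldl min L := by
  cases xs with
  | nil => simp at hne
  | cons x t =>
    rw [PySem.List.min?_id_cons]
    simp only [Option.getD_some, List.foldl_cons]
    rw [show min L x = x from min_eq_right (h0 x (by simp))]

theorem foldl_max_filter {α : Type} (l : List α) (F : α → Int) (P : α → Bool)
    (hF : ∀ p ∈ l, P p = false → F p = 0) (s : Int) (hs : 0 ≤ s) :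
    (l.map F).foldl max s = ((l.filter P).map F).foldl max s := by
  induction l generalizing s with
  | nil => rfl
  | cons p rest ih =>
    by_cases hP : P p
    · simp only [List.map_cons, List.filter_cons, hP, if_pos, List.foldl_cons]
      exact ih (fun q hq => hF q (by simp [hq])) _ (le_trans hs (le_max_left _ _))
    · simp only [List.map_cons, List.filter_cons, List.foldl_cons, Bool.not_eq_true] at *
      rw [hF p (by simp) (by simpa using hP)]
      rw [max_eq_left hs]
      simp only [hP, Bool.false_eq_true, if_neg, not_false_iff]
      exact ih (fun q hq => hF q (by simp [hq])) s hs

theorem foldl_min_filter {α : Type} (l : List α) (F : α → Int) (P : α → Bool) (L : Int)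
    (hF : ∀ p ∈ l, P p = false → F p = L) (s : Int) (hs : s ≤ L) :
    (l.map F).foldl min s = ((l.filter P).map F).foldl min s := by
  induction l generalizing s with
  | nil => rfl
  | cons p rest ih =>
    by_cases hP : P p
    · simp only [List.map_cons, List.filter_cons, hP, if_pos, List.foldl_cons]
      exact ih (fun q hq => hF q (by simp [hq])) _ (le_trans (min_le_left _ _) hs)
    · simp only [List.map_cons, List.filter_cons, List.foldl_cons, Bool.not_eq_true] at *
      rw [hF p (by simp) (by simpa using hP)]
      rw [min_eq_left hs]
      simp only [hP, Bool.false_eq_true, if_neg, not_false_iff]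
      exact ih (fun q hq => hF q (by simp [hq])) s hs

theorem maxD_eq_foldl (xs : List Int) (h0 : ∀ x ∈ xs, 0 ≤ x) :
    PySem.List.maxD xs (fun y => y) 0 = xs.foldl max 0 := by
  cases xs with
  | nil => rfl
  | cons x t => exact getD_max?_eq_foldl _ h0 (by simp)

theorem minD_eq_foldl (xs : List Int) (L : Int) (h0 : ∀ x ∈ xs, x ≤ L) :
    PySem.List.minD xs (fun y => y) L = xs.foldl min L := by
  cases xs with
  | nil => rfl
  | cons x t =>
    unfold PySem.List.minD
    rw [PySem.List.min?_id_cons]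
    simp only [Option.getD_some, List.foldl_cons]
    rw [show min L x = x from min_eq_right (h0 x (by simp))]

theorem mem_enum_snd {α : Type} (l : List α) (s : Int) (pr : Int × α)
    (h : pr ∈ PySem.List.enumerate l s) : pr.2 ∈ l := by
  rw [PySem.List.mem_enumerate_iff] at h
  obtain ⟨j, hj, rfl⟩ := h
  exact List.getElem_mem hj

-- the per-read core, front side
theorem maxleft_eq (k_mers : List (Int × String)) (vec : List Char) (r : String) (k : Int)
    (hne : k_mers ≠ [])
    (hPOK : ∀ p ∈ k_mers, preOK vec.length k p r) :
    (PySem.List.max? (k_mers.foldl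
        (fun acc p => acc ++ [front r.toList p.2.toList p.1 vec k]) []) (fun x => x)).getD 0
      = PySem.List.maxD
          (((k_mers.filter (fun p => decide (PySem.List.slice r.toList none (some k) <+: p.2.toList))).map
              (fun p => p.1)).map (fun idx => extend_front r.toList idx vec))
          (fun x => x) 0 := by
  rw [PySem.List.foldl_append_singleton_eq_map, List.nil_append]
  have hmapA : k_mers.map (fun p => front r.toList p.2.toList p.1 vec k)
      = k_mers.map (fun p => if PySem.List.slice r.toList none (some k) <+: p.2.toList then
          frontGoA r.toList vec p.1 (List.range r.toList.length) 0 else 0) :=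
    List.map_congr_left (fun p hp => front_eq r p.2.toList p.1 vec k (hPOK p hp).1)
  rw [hmapA]
  rw [getD_max?_eq_foldl _ ?pos (by simpa using hne)]
  case pos =>
    intro x hx
    rw [List.mem_map] at hx
    obtain ⟨p, hp, rfl⟩ := hx
    split_ifs
    · exact frontGo_nonneg _ _ _ _ _ le_rfl
    · exact le_rfl
  rw [foldl_max_filter _ _
    (fun p => decide (PySem.List.slice r.toList none (some k) <+: p.2.toList)) ?hF 0 le_rfl]
  case hF =>
    intro p _ hPf
    rw [if_neg (by simpa using hPf)]
  rw [maxD_eq_foldl _ ?nn]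
  case nn =>
    intro x hx
    rw [List.mem_map] at hx
    obtain ⟨idx, _, rfl⟩ := hx
    unfold extend_front
    rw [frontGo_eq]
    exact frontGo_nonneg _ _ _ _ _ le_rfl
  rw [List.map_map]
  refine congrArg (fun l : List Int => l.foldl max 0) (List.map_congr_left (fun p hp => ?_))
  have hP : PySem.List.slice r.toList none (some k) <+: p.2.toList := by
    have := List.of_mem_filter hp
    simpa using this
  simp only [Function.comp]
  rw [if_pos hP]
  unfold extend_front
  rw [frontGo_eq]

-- the per-read core, back side
theorem minright_eq (k_mers : List (Int × String)) (vec : List Char) (r : String) (k : Int)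
    (hne : k_mers ≠ [])
    (hPOK : ∀ p ∈ k_mers, preOK vec.length k p r) :
    (PySem.List.min? (k_mers.foldl
        (fun acc p => acc ++ [back r.toList p.2.toList p.1 vec k]) []) (fun x => x)).getD 0
      = PySem.List.minD
          (((k_mers.filter (fun p => decide (PySem.List.slice r.toList (some (-k)) (some (-1)) <+: p.2.toList))).map
              (fun p => p.1)).map (fun idx => extend_back r.toList idx vec k))
          (fun x => x) (r.toList.length : Int) := by
  rw [PySem.List.foldl_append_singleton_eq_map, List.nil_append]
  have hbnd : ∀ p ∈ k_mers,
      PySem.List.slice r.toList (some (-k)) (some (-1)) <+: p.2.toList →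
      backGoA r.toList vec p.1 k (List.range r.toList.length) (r.toList.length : Int)
        ≤ (r.toList.length : Int) := by
    intro p hp hmatch
    rcases lt_or_ge p.1 0 with h | h
    · rw [backGo_stop _ _ _ _ _ _ h]
    · by_cases hn : 0 < r.toList.length
      · exact backGo_le _ _ _ _ ((hPOK p hp).2.2.2 hmatch hn h).2.1 _ _ le_rfl
      · have h0 : r.toList.length = 0 := by omega
        rw [h0]
        simp [backGoA]
  have hmapA : k_mers.map (fun p => back r.toList p.2.toList p.1 vec k)
      = k_mers.map (fun p =>
          if PySem.List.slice r.toList (some (-k)) (some (-1)) <+: p.2.toList then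
            backGoA r.toList vec p.1 k (List.range r.toList.length) (r.toList.length : Int)
          else (r.toList.length : Int)) :=
    List.map_congr_left (fun p hp => back_eq r p.2.toList p.1 vec k (hPOK p hp).2.1)
  rw [hmapA]
  rw [getD_min?_eq_foldl _ (r.toList.length : Int) ?le (by simpa using hne)]
  case le =>
    intro x hx
    rw [List.mem_map] at hx
    obtain ⟨p, hp, rfl⟩ := hx
    split_ifs with hmatch
    · exact hbnd p hp hmatch
    · exact le_rfl
  rw [foldl_min_filter _ _
    (fun p => decide (PySem.List.slice r.toList (some (-k)) (some (-1)) <+: p.2.toList))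
    (r.toList.length : Int) ?hF (r.toList.length : Int) le_rfl]
  case hF =>
    intro p _ hPf
    rw [if_neg (by simpa using hPf)]
  rw [minD_eq_foldl _ (r.toList.length : Int) ?bd]
  case bd =>
    intro x hx
    rw [List.mem_map] at hx
    obtain ⟨idx, hidx, rfl⟩ := hx
    rw [List.mem_map] at hidx
    obtain ⟨p, hp, rfl⟩ := hidx
    have hPp : PySem.List.slice r.toList (some (-k)) (some (-1)) <+: p.2.toList := by
      have := List.of_mem_filter hp
      simpa using this
    unfold extend_back
    rw [backGo_eq]
    exact hbnd p (List.mem_of_mem_filter hp) hPp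
  rw [List.map_map]
  refine congrArg (fun l : List Int => l.foldl min (r.toList.length : Int)) (List.map_congr_left (fun p hp => ?_))
  have hP : PySem.List.slice r.toList (some (-k)) (some (-1)) <+: p.2.toList := by
    have := List.of_mem_filter hp
    simpa using this
  simp only [Function.comp]
  rw [if_pos hP]
  unfold extend_back
  rw [backGo_eq]

-- ===== VERDICT (by name: the statement is the Claim_ definition above) =====
theorem remove_contam_spec : Claim_equal_remove_contam := by
  intro reads k_mers vector k _ hpre
  obtain ⟨hne', hPOK⟩ := hpre
  unfold Spec_remove_contam
  show remove_contam reads k_mers vector k = remove_contam_alt reads k_mers vector k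
  by_cases hrs : reads = []
  · subst hrs
    rfl
  have hne : k_mers ≠ [] := hne'.resolve_left hrs
  unfold remove_contam remove_contam_alt
  refine PySem.List.foldl_congr_mem _ _ _ _ (fun st pr hpr => ?_)
  have hP : ∀ p ∈ k_mers, preOK vector.toList.length k p pr.2 :=
    fun p hp => hPOK p hp pr.2 (mem_enum_snd _ _ _ hpr)
  dsimp only
  rw [maxleft_eq k_mers vector.toList pr.2 k hne hP,
    minright_eq k_mers vector.toList pr.2 k hne hP,
    pidx_lookup k_mers (PySem.List.slice pr.2.toList none (some k)),
    pidx_lookup k_mers (PySem.List.slice pr.2.toList (some (-k)) (some (-1)))]
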